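-- pv_equiv track=rewrite | github.com/Chago0900/EL3307-Multiplicador_Combinacional | conversion.py | dec_a_bin
-- ===== SOURCE A (Python) =====
-- def dec_a_bin(numero_decimal):
--     numero_binario = 0
--     multiplicador = 1
--
--     while numero_decimal != 0:
--         # se almacena el módulo en el orden correcto
--         numero_binario = numero_binario + numero_decimal % 2 * multiplicador
--         numero_decimal //= 2
--         multiplicador *= 10
--
--     return numero_binario
-- ===== SOURCE B (Python) =====
-- def dec_a_bin(numero_decimal):
--     digits = []
--     while numero_decimal != 0:
--         digits.append(numero_decimal % 2)
--         numero_decimal //= 2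
--     result = 0
--     for d in reversed(digits):
--         result = result * 10 + d
--     return result
-- ===== Notes on version B (the rewrite author's own statement) =====
-- stated objective: alternative
-- what changed: Replaced A's single fused loop carrying an accumulator and a growing power-of-10 multiplier by a two-phase algorithm: first collect the binary digits into a list, then fold the reversed list with result = result*10 + d, eliminating the multiplier state entirely.
import Mathlib
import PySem

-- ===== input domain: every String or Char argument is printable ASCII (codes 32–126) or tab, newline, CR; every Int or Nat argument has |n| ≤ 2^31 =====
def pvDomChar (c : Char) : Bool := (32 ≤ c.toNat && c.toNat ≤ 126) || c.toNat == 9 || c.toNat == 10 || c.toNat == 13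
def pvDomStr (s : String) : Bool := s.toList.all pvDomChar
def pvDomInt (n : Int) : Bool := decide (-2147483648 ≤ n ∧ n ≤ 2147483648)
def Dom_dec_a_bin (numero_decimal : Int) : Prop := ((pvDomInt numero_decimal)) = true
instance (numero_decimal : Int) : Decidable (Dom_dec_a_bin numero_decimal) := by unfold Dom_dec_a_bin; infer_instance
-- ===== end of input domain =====

-- B replaces A's fused loop (accumulator + power-of-10 multiplier) by two phases: collect the
-- bits into a list, then fold the reversed list; same cost (objective: alternative).
-- On negative inputs A loops forever and B loops forever too, so Pre_ excludes them.

-- ===== PORT A =====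
-- A's while loop; fuel only makes the recursion total (numero_decimal halves each step, so natAbs+1 steps always suffice on Pre_)
def decLoopA (fuel : Nat) (n b m : Int) : Int :=
  match fuel with
  | 0 => b
  | fuel + 1 =>
    if n ≠ 0 then
      decLoopA fuel (PySem.Int.floordiv n 2) (b + PySem.Int.mod n 2 * m) (m * 10)
    else b

def dec_a_bin (numero_decimal : Int) : Int :=
  decLoopA (numero_decimal.natAbs + 1) numero_decimal 0 1

-- ===== PORT B =====
-- phase 1 of B: the while loop appending numero_decimal % 2 to the digits list (fuel totalises)
def collectBits (fuel : Nat) (n : Int) : List Int :=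
  match fuel with
  | 0 => []
  | fuel + 1 =>
    if n ≠ 0 then
      PySem.Int.mod n 2 :: collectBits fuel (PySem.Int.floordiv n 2)
    else []

def dec_a_bin_alt (numero_decimal : Int) : Int :=
  -- phase 2: for d in reversed(digits): result = result * 10 + d
  (collectBits (numero_decimal.natAbs + 1) numero_decimal).reverse.foldl
    (fun result d => result * 10 + d) 0

-- ===== PRECONDITION & SPEC =====
-- Pre_ excludes negative inputs, on which A's loop (and B's first phase) never terminates.
def Pre_dec_a_bin (numero_decimal : Int) : Prop := 0 ≤ numero_decimal
instance (numero_decimal : Int) : Decidable (Pre_dec_a_bin numero_decimal) := by unfold Pre_dec_a_bin; infer_instance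
def pvWitness_dec_a_bin : Int := (5)
def Spec_dec_a_bin (numero_decimal : Int) (out : Int) : Prop := out = dec_a_bin_alt numero_decimal
instance (numero_decimal : Int) (out : Int) : Decidable (Spec_dec_a_bin numero_decimal out) := by unfold Spec_dec_a_bin; infer_instance

-- ===== CLAIM (what is proved, stated in full; the proofs are below) =====
def Claim_equal_dec_a_bin : Prop := ∀ (numero_decimal : Int), Dom_dec_a_bin numero_decimal → Pre_dec_a_bin numero_decimal → Spec_dec_a_bin numero_decimal (dec_a_bin numero_decimal)

-- ===== LEMMAS AND PROOFS =====

-- reference function on Nat: the packed-decimal binary form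
def decG (n : Nat) : Int :=
  if n = 0 then 0 else decG (n / 2) * 10 + (n % 2 : Nat)
decreasing_by exact Nat.div_lt_self (Nat.pos_of_ne_zero (by assumption)) (by norm_num)

lemma floordiv_toNat (n : Int) (h : 0 ≤ n) :
    PySem.Int.floordiv n 2 = ((n.toNat / 2 : Nat) : Int) := by
  rw [show n = ((n.toNat : Nat) : Int) by omega]
  exact_mod_cast PySem.Int.floordiv_natCast n.toNat 2

lemma mod_toNat (n : Int) (h : 0 ≤ n) :
    PySem.Int.mod n 2 = ((n.toNat % 2 : Nat) : Int) := by
  rw [show n = ((n.toNat : Nat) : Int) by omega]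
  exact_mod_cast PySem.Int.mod_natCast n.toNat 2

lemma decLoopA_eq (fuel : Nat) : ∀ (n b m : Int), 0 ≤ n → n.natAbs < fuel →
    decLoopA fuel n b m = b + m * decG n.toNat := by
  induction fuel with
  | zero => intro n b m _ h; omega
  | succ f ih =>
    intro n b m hn hf
    rw [decLoopA, decG]
    by_cases h0 : n = 0
    · simp [h0]
    · have hpos : 0 < n := lt_of_le_of_ne hn (Ne.symm h0)
      rw [if_pos h0, if_neg (by omega : ¬ n.toNat = 0)]
      rw [floordiv_toNat n hn, mod_toNat n hn,
        ih _ _ _ (by positivity) (by simp; omega)]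
      simp only [Int.toNat_natCast]
      ring

lemma collect_fold (fuel : Nat) : ∀ (n acc : Int), 0 ≤ n → n.natAbs < fuel →
    (collectBits fuel n).reverse.foldl (fun result d => result * 10 + d) acc
      = acc * 10 ^ (collectBits fuel n).length + decG n.toNat := by
  induction fuel with
  | zero => intro n acc _ h; omega
  | succ f ih =>
    intro n acc hn hf
    rw [collectBits, decG]
    by_cases h0 : n = 0
    · simp [h0]
    · have hpos : 0 < n := lt_of_le_of_ne hn (Ne.symm h0)
      rw [if_pos h0, if_neg (by omega : ¬ n.toNat = 0)]
      rw [floordiv_toNat n hn, mod_toNat n hn]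
      simp only [List.reverse_cons, List.foldl_append, List.foldl_cons, List.foldl_nil,
        List.length_cons]
      rw [ih _ _ (by positivity) (by simp; omega)]
      simp only [Int.toNat_natCast]
      ring

-- ===== VERDICT (by name: the statement is the Claim_ definition above) =====
theorem dec_a_bin_spec : Claim_equal_dec_a_bin := by
  intro n _ hpre
  unfold Spec_dec_a_bin dec_a_bin dec_a_bin_alt
  rw [decLoopA_eq _ _ _ _ hpre (by omega), collect_fold _ _ _ hpre (by omega)]
  ring
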